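-- pv_equiv track=rewrite | github.com/Ryuichi-Sasaki/CLRS | Ch15/src/cut_rod.py | costed_bottom_up_cut_rod
-- ===== SOURCE A (Python) =====
-- def costed_bottom_up_cut_rod(p, n, c):
--     """ θ(n^2)
--         金属棒の切出しにかかるコストを考慮する版。
--     """
--     r = [None] * (n + 1)
--     r[0] = 0
--     for i in range(1, n + 1):
--         q = float("-inf")
--         for j in range(1, i):   #切出すパターンのみ
--             q = max(q, p[j - 1] + r[i - j] - c)
--         r[i] = max(q, p[i - 1]) #切出さないパターンと比較
--     return r[n]
-- ===== SOURCE B (Python) =====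
-- def costed_bottom_up_cut_rod(p, n, c):
--     """Top-down memoized recursion instead of a bottom-up DP table."""
--     memo = {0: 0}
--
--     def solve(i):
--         if i in memo:
--             return memo[i]
--         best = p[i - 1]                      # no-cut: sell the whole piece, no cost
--         for j in range(1, i):                # first piece j, pay one cut cost c
--             best = max(best, p[j - 1] + solve(i - j) - c)
--         memo[i] = best
--         return best
--
--     return solve(n)
-- ===== Notes on version B (the rewrite author's own statement) =====
-- stated objective: alternative
-- what changed: Replaces A's bottom-up DP that fills a preallocated table r[0..n] with a top-down recursion solve(i) memoized in a dict, recursing on the length of the remaining rod.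
import Mathlib
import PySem

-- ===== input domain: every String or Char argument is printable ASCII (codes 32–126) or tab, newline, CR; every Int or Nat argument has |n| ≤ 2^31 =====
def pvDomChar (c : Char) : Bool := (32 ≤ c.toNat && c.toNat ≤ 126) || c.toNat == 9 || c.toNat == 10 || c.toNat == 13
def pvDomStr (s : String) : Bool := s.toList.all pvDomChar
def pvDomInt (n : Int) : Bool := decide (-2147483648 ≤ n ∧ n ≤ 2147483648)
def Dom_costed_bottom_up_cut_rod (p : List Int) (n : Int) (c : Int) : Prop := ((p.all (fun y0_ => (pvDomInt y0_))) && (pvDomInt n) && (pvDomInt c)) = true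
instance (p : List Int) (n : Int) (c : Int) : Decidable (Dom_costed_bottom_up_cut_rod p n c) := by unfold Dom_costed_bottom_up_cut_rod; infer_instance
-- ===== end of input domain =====

-- B replaces A's bottom-up DP table by a top-down memoized recursion (objective: alternative decomposition, same values).

-- ===== PORT A =====
-- Python's running float('-inf') maximum is modeled as Option Int: none = -inf (never the final value:
-- the no-cut comparison max(q, p[i-1]) makes every stored entry an int, exactly as in Python).
def pymax2 (q : Option Int) (v : Int) : Int :=
  match q with
  | none => v
  | some x => max x v

-- inner loop: q = max over j in range(1, i) of p[j-1] + r[i-j] - c, starting from -inf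
def aInner (p : List Int) (c : Int) (r : List Int) (i : Int) : Option Int :=
  (PySem.List.pyRange 1 i 1).foldl
    (fun q j => some (pymax2 q (PySem.List.pyGetD p (j - 1) 0 + r.getD (i - j).toNat 0 - c))) none

-- one iteration of the outer loop: r[i] = max(q, p[i-1]); assignments r[1], r[2], … in order are
-- modeled by appending to the list of already-assigned entries (r[i-j] with 1 ≤ i-j < i is assigned).
def aStep (p : List Int) (c : Int) (r : List Int) (i : Int) : List Int :=
  r ++ [pymax2 (aInner p c r i) (PySem.List.pyGetD p (i - 1) 0)]

def costed_bottom_up_cut_rod (p : List Int) (n : Int) (c : Int) : Int :=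
  ((PySem.List.pyRange 1 (n + 1) 1).foldl (aStep p c) [0]).getD n.toNat 0

-- ===== PORT B =====
-- Source B's solve(i): 0 for i = 0, else fold of max over j = 1..i-1 (jm = j-1) starting from the no-cut
-- value p[i-1]; the Python memo dict only caches, it never changes a value, so it is dropped here.
def solveB (p : List Int) (c : Int) : Nat → Int
  | 0 => 0
  | m + 1 => (List.range m).foldl
      (fun best jm => max best (p.getD jm 0 + solveB p c (m - jm) - c)) (p.getD m 0)
decreasing_by exact Nat.lt_succ_of_le (Nat.sub_le m jm)

def costed_bottom_up_cut_rod_alt (p : List Int) (n : Int) (c : Int) : Int :=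
  solveB p c n.toNat

-- ===== PRECONDITION & SPEC =====
-- Pre_: exactly where Python A returns — for n < 0 the assignment r[0] = 0 hits an empty list and
-- for n > len(p) the read p[i-1] goes out of range (both IndexError).
def Pre_costed_bottom_up_cut_rod (p : List Int) (n : Int) (c : Int) : Prop :=
  0 ≤ n ∧ n ≤ (p.length : Int)
instance (p : List Int) (n : Int) (c : Int) : Decidable (Pre_costed_bottom_up_cut_rod p n c) := by
  unfold Pre_costed_bottom_up_cut_rod; infer_instance

def pvWitness_costed_bottom_up_cut_rod : List Int × Int × Int := ([1, 5, 8, 9], 4, 1)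

def Spec_costed_bottom_up_cut_rod (p : List Int) (n : Int) (c : Int) (out : Int) : Prop :=
  out = costed_bottom_up_cut_rod_alt p n c
instance (p : List Int) (n : Int) (c : Int) (out : Int) : Decidable (Spec_costed_bottom_up_cut_rod p n c out) := by
  unfold Spec_costed_bottom_up_cut_rod; infer_instance

-- ===== CLAIM (what is proved, stated in full; the proofs are below) =====
def Claim_equal_costed_bottom_up_cut_rod : Prop := ∀ (p : List Int) (n : Int) (c : Int), Dom_costed_bottom_up_cut_rod p n c → Pre_costed_bottom_up_cut_rod p n c → Spec_costed_bottom_up_cut_rod p n c (costed_bottom_up_cut_rod p n c)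

-- ===== LEMMAS AND PROOFS =====

-- a fold of `some ∘ pymax2` from an Option accumulator, finished off with one more pymax2,
-- is the plain Int max-fold with the extra value folded into the start
lemma foldl_pymax2 (g : Nat → Int) :
    ∀ (l : List Nat) (q : Option Int) (a : Int),
      pymax2 (l.foldl (fun q t => some (pymax2 q (g t))) q) a
        = l.foldl (fun b t => max b (g t)) (pymax2 q a) := by
  intro l
  induction l with
  | nil => intro q a; rfl
  | cons t l ih =>
    intro q a
    simp only [List.foldl_cons]
    rw [ih]
    congr 1
    cases q with
    | none => exact max_comm _ _
    | some x => exact max_right_comm x (g t) a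

-- one outer-loop step on the table of already-computed solveB values produces the next solveB value
lemma aStep_correct (p : List Int) (c : Int) (k : Nat) :
    aStep p c ((List.range (k + 1)).map (solveB p c)) ((k : Int) + 1)
      = (List.range (k + 2)).map (solveB p c) := by
  have hrange : (List.range (k + 2)).map (solveB p c)
      = (List.range (k + 1)).map (solveB p c) ++ [solveB p c (k + 1)] := by
    rw [List.range_succ, List.map_append, List.map_singleton]
  rw [hrange]
  unfold aStep
  congr 1
  -- rewrite the inner loop into B's fold over List.range k
  have hpr : PySem.List.pyRange 1 ((k : Int) + 1) 1
      = (List.range k).map (fun t : Nat => 1 + (t : Int)) := by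
    have h : ((k : Int) + 1 - 1).toNat = k := by omega
    rw [PySem.List.pyRange_one, h]
  have hinner : aInner p c ((List.range (k + 1)).map (solveB p c)) ((k : Int) + 1)
      = (List.range k).foldl
          (fun q t => some (pymax2 q (p.getD t 0 + solveB p c (k - t) - c))) none := by
    unfold aInner
    rw [hpr, List.foldl_map]
    apply PySem.List.foldl_congr_mem (List.range k)
    intro acc t ht
    have htk : t < k := List.mem_range.mp ht
    have h1 : (1 + (t : Int) - 1) = (t : Int) := by ring
    have h2 : ((k : Int) + 1 - (1 + (t : Int))).toNat = k - t := by omega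
    rw [h1, h2, PySem.List.pyGetD_natCast,
        PySem.List.getD_map_range (solveB p c) (k + 1) (k - t) 0 (by omega)]
  rw [hinner]
  have hp : PySem.List.pyGetD p ((k : Int) + 1 - 1) 0 = p.getD k 0 := by
    have : ((k : Int) + 1 - 1) = ((k : Nat) : Int) := by ring
    rw [this, PySem.List.pyGetD_natCast]
  rw [hp, foldl_pymax2 (fun t => p.getD t 0 + solveB p c (k - t) - c) (List.range k) none (p.getD k 0)]
  conv_rhs => rw [solveB]
  rfl

-- the whole outer loop builds the table [solveB 0, …, solveB k]
lemma table_correct (p : List Int) (c : Int) :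
    ∀ (k : Nat),
      (PySem.List.pyRange 1 ((k : Int) + 1) 1).foldl (aStep p c) [0]
        = (List.range (k + 1)).map (solveB p c) := by
  intro k
  induction k with
  | zero =>
    rw [PySem.List.pyRange_one_eq_nil (by norm_num)]
    simp [List.range_succ, solveB]
  | succ k ih =>
    have hsplit : PySem.List.pyRange 1 (((k + 1 : Nat) : Int) + 1) 1
        = PySem.List.pyRange 1 ((k : Int) + 1) 1 ++ [(k : Int) + 1] := by
      push_cast
      exact PySem.List.pyRange_one_succ_right (by omega)
    rw [hsplit, List.foldl_append, ih]
    simp only [List.foldl_cons, List.foldl_nil]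
    rw [aStep_correct]

-- ===== VERDICT (by name: the statement is the Claim_ definition above) =====
theorem costed_bottom_up_cut_rod_spec : Claim_equal_costed_bottom_up_cut_rod := by
  intro p n c _ hpre
  obtain ⟨hn0, _⟩ := hpre
  unfold Spec_costed_bottom_up_cut_rod costed_bottom_up_cut_rod costed_bottom_up_cut_rod_alt
  obtain ⟨N, rfl⟩ := Int.eq_ofNat_of_zero_le hn0
  rw [table_correct p c N]
  simp only [Int.toNat_natCast]
  exact PySem.List.getD_map_range (solveB p c) (N + 1) N 0 (by omega)
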